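-- pv_equiv track=rewrite | github.com/entwanne/aiorobot | print_piano.py | get_white_piano
-- ===== SOURCE A (Python) =====
-- WHITE = ' '
--
-- WHITE_LEFT = WHITE_RIGHT = WHITE_SEP = '┃'
--
-- WHITE_LEFT = WHITE_RIGHT = WHITE_SEP = '┃'
--
-- WHITE_LEFT = WHITE_RIGHT = WHITE_SEP = '┃'
--
-- WHITE_BOTTOM = '━'
--
-- WHITE_BOTTOM_LEFT = '┗'
--
-- WHITE_BOTTOM_RIGHT = '┛'
--
-- WHITE_BOTTOM_SEP = '┻'
--
-- def get_piano_line(labels, width, char, left_char, right_char, sep_char):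
--     line = ''
--     left = True
--
--     for label in labels:
--         if left:
--             line += left_char
--         else:
--             line += sep_char
--         line += label.center(width - 1, char)
--         left = False
--     line += right_char
--     return line
--
-- def get_white_piano(notes, keys, note_width, height):
--     empty_labels = [''] * len(notes)
--     y_label1 = max(height - 5, 0)
--     y_label2 = max(height - 3, 0)
--
--     for y in range(height - 1):
--         if y == y_label1:
--             labels = notes
--         elif y == y_label2:
--             labels = keys
--         else:
--             labels = empty_labels
--         yield get_piano_line(labels, note_width, WHITE, WHITE_LEFT, WHITE_RIGHT, WHITE_SEP)
--     yield get_piano_line(empty_labels, note_width, WHITE_BOTTOM, WHITE_BOTTOM_LEFT, WHITE_BOTTOM_RIGHT, WHITE_BOTTOM_SEP)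
-- ===== SOURCE B (Python) =====
-- WHITE = ' '
-- WHITE_LEFT = WHITE_RIGHT = WHITE_SEP = '┃'
-- WHITE_BOTTOM = '━'
-- WHITE_BOTTOM_LEFT = '┗'
-- WHITE_BOTTOM_RIGHT = '┛'
-- WHITE_BOTTOM_SEP = '┻'
--
--
-- def _row(labels, width, char, left_char, right_char, sep_char):
--     if not labels:
--         return right_char
--     return left_char + sep_char.join(l.center(width - 1, char) for l in labels) + right_char
--
--
-- def get_white_piano(notes, keys, note_width, height):
--     empty_labels = [''] * len(notes)
--     n = height - 1
--     if n > 0: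
--         # each distinct line is rendered once and emitted by counted repetition
--         blank = _row(empty_labels, note_width, WHITE, WHITE_LEFT, WHITE_RIGHT, WHITE_SEP)
--         y1 = max(height - 5, 0)
--         y2 = max(height - 3, 0)
--         for _ in range(y1):
--             yield blank
--         yield _row(notes, note_width, WHITE, WHITE_LEFT, WHITE_RIGHT, WHITE_SEP)
--         if y1 < y2:
--             for _ in range(y2 - y1 - 1):
--                 yield blank
--             yield _row(keys, note_width, WHITE, WHITE_LEFT, WHITE_RIGHT, WHITE_SEP)
--         for _ in range(n - 1 - y2):
--             yield blank
--     yield _row(empty_labels, note_width, WHITE_BOTTOM, WHITE_BOTTOM_LEFT, WHITE_BOTTOM_RIGHT, WHITE_BOTTOM_SEP)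
-- ===== Notes on version B (the rewrite author's own statement) =====
-- stated objective: alternative
-- what changed: Instead of re-rendering a line per row with an if/elif selector inside the loop, B renders each of the three distinct lines (blank, notes, keys) exactly once and emits them by counted repetition (blank prefix, notes line, blank gap, keys line, blank suffix, bottom), and builds a line by sep-joining centered labels instead of an accumulating left-flag loop.
import Mathlib
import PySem

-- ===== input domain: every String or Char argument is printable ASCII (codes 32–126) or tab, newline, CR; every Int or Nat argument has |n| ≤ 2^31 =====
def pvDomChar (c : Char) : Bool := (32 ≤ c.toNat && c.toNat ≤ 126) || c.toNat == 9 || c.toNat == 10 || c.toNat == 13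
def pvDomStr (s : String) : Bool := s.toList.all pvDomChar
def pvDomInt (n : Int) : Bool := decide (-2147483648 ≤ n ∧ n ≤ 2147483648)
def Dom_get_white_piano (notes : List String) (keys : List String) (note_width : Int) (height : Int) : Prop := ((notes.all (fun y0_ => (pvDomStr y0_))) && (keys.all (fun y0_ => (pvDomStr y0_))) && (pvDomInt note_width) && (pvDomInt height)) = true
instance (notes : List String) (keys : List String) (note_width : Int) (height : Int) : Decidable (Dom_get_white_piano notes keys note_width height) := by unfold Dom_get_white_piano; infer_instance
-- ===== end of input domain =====

-- B renders each distinct line (blank/notes/keys) once and emits it by counted repetition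
-- instead of a per-row if/elif selection, and sep-joins centered labels (objective: alternative).

-- str.center(w, c): exact port of CPython's centering rule (extra fill goes right,
-- except the odd-margin/odd-width case which adds one to the left).
def pyCenter (s : List Char) (w : Int) (c : Char) : List Char :=
  let marg := w - (s.length : Int)
  if marg ≤ 0 then s
  else
    let left := (marg / 2 + (if marg % 2 = 1 ∧ w % 2 = 1 then 1 else 0)).toNat
    List.replicate left c ++ s ++ List.replicate (marg.toNat - left) c

-- ===== PORT A =====
def get_piano_line (labels : List String) (width : Int) (ch lc rc sc : Char) : String :=
  let st := labels.foldl
    (fun (st : List Char × Bool) label =>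
      ((st.1 ++ [if st.2 then lc else sc]) ++ pyCenter label.toList (width - 1) ch, false))
    ([], true)
  String.ofList (st.1 ++ [rc])

def get_white_piano (notes : List String) (keys : List String) (note_width : Int) (height : Int) : List String :=
  let empty_labels : List String := List.replicate notes.length ""
  let y_label1 := max (height - 5) 0
  let y_label2 := max (height - 3) 0
  ((PySem.List.pyRange 0 (height - 1) 1).map (fun y =>
      let labels := if y = y_label1 then notes else if y = y_label2 then keys else empty_labels
      get_piano_line labels note_width ' ' '┃' '┃' '┃'))
  ++ [get_piano_line empty_labels note_width '━' '┗' '┛' '┻']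

-- ===== PORT B =====
def row_alt (labels : List String) (width : Int) (ch lc rc sc : Char) : String :=
  if labels = [] then String.ofList [rc]
  else String.ofList ([lc] ++ List.intercalate [sc] (labels.map (fun l => pyCenter l.toList (width - 1) ch)) ++ [rc])

def get_white_piano_alt (notes : List String) (keys : List String) (note_width : Int) (height : Int) : List String :=
  let empty_labels : List String := List.replicate notes.length ""
  let n := height - 1
  (if 0 < n then
    let blank := row_alt empty_labels note_width ' ' '┃' '┃' '┃'
    let y1 := max (height - 5) 0
    let y2 := max (height - 3) 0
    List.replicate y1.toNat blank
      ++ [row_alt notes note_width ' ' '┃' '┃' '┃']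
      ++ (if y1 < y2 then
            List.replicate (y2 - y1 - 1).toNat blank
              ++ [row_alt keys note_width ' ' '┃' '┃' '┃']
          else [])
      ++ List.replicate (n - 1 - y2).toNat blank
  else [])
  ++ [row_alt empty_labels note_width '━' '┗' '┛' '┻']

-- ===== PRECONDITION & SPEC =====
def Spec_get_white_piano (notes : List String) (keys : List String) (note_width : Int) (height : Int) (out : List String) : Prop := out = get_white_piano_alt notes keys note_width height
instance (notes : List String) (keys : List String) (note_width : Int) (height : Int) (out : List String) : Decidable (Spec_get_white_piano notes keys note_width height out) := by unfold Spec_get_white_piano; infer_instance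

-- ===== CLAIM =====
def Claim_equal_get_white_piano : Prop := ∀ (notes : List String) (keys : List String) (note_width : Int) (height : Int), Dom_get_white_piano notes keys note_width height → Spec_get_white_piano notes keys note_width height (get_white_piano notes keys note_width height)

-- ===== LEMMAS AND PROOFS =====

theorem foldl_false (ls : List String) (width : Int) (ch lc sc : Char) (acc : List Char) :
    (ls.foldl
      (fun (st : List Char × Bool) label =>
        ((st.1 ++ [if st.2 then lc else sc]) ++ pyCenter label.toList (width - 1) ch, false))
      (acc, false)).1
    = acc ++ ls.flatMap (fun l => sc :: pyCenter l.toList (width - 1) ch) := by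
  induction ls generalizing acc with
  | nil => simp
  | cons l ls ih =>
      rw [List.foldl_cons]
      rw [if_neg (by simp : ¬ ((false : Bool) = true))]
      rw [ih]
      simp

theorem intercalate_flat (ls : List String) (l : String) (width : Int) (ch sc : Char) :
    List.intercalate [sc] ((l :: ls).map (fun x => pyCenter x.toList (width - 1) ch))
    = pyCenter l.toList (width - 1) ch ++ ls.flatMap (fun x => sc :: pyCenter x.toList (width - 1) ch) := by
  induction ls generalizing l with
  | nil => simp [List.intercalate]
  | cons y ys ih =>
      rw [List.map_cons, List.map_cons]
      rw [show List.intercalate [sc] (pyCenter l.toList (width - 1) ch :: pyCenter y.toList (width - 1) ch :: List.map (fun x => pyCenter x.toList (width - 1) ch) ys) = pyCenter l.toList (width - 1) ch ++ [sc] ++ List.intercalate [sc] (pyCenter y.toList (width - 1) ch :: List.map (fun x => pyCenter x.toList (width - 1) ch) ys) from by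
        simp [List.intercalate, List.intersperse]]
      have h2 := ih y
      rw [List.map_cons] at h2
      rw [h2]
      simp

theorem line_eq (labels : List String) (width : Int) (ch lc rc sc : Char) :
    get_piano_line labels width ch lc rc sc = row_alt labels width ch lc rc sc := by
  cases labels with
  | nil => simp [get_piano_line, row_alt]
  | cons l ls =>
      unfold get_piano_line row_alt
      dsimp only
      rw [List.foldl_cons]
      rw [if_neg (by simp : ¬ ((l :: ls) = []))]
      rw [if_pos rfl, List.nil_append]
      rw [foldl_false ls width ch lc sc, intercalate_flat]
      simp

theorem map_blank {A : Type} (a b : Int) (g : Int → A) (v : A)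
    (hg : ∀ y : Int, a ≤ y → y < b → g y = v) :
    (PySem.List.pyRange a b 1).map g = List.replicate (b - a).toNat v := by
  apply List.ext_getElem
  · simp [PySem.List.length_pyRange_one]
  · intro i hi hi'
    simp only [List.getElem_map, PySem.List.getElem_pyRange_one, List.getElem_replicate]
    have hib : i < (b - a).toNat := by simpa [PySem.List.length_pyRange_one] using hi
    exact hg _ (by omega) (by omega)

theorem rows_eq (notes keys : List String) (e : List String) (height : Int)
    (f : List String → String) :
    (PySem.List.pyRange 0 (height - 1) 1).map (fun y =>
      f (if y = max (height - 5) 0 then notes else if y = max (height - 3) 0 then keys else e))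
    = (if 0 < height - 1 then
        List.replicate (max (height - 5) 0).toNat (f e)
          ++ [f notes]
          ++ (if max (height - 5) 0 < max (height - 3) 0 then
                List.replicate (max (height - 3) 0 - max (height - 5) 0 - 1).toNat (f e)
                  ++ [f keys]
              else [])
          ++ List.replicate (height - 1 - 1 - max (height - 3) 0).toNat (f e)
      else []) := by
  set y1 := max (height - 5) 0 with hy1
  set y2 := max (height - 3) 0 with hy2
  have hy10 : 0 ≤ y1 := le_max_right _ _
  have hy12 : y1 ≤ y2 := by omega
  by_cases hn : 0 < height - 1
  · rw [if_pos hn]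
    have hy2n : y2 < height - 1 := by omega
    by_cases h12 : y1 < y2
    · rw [if_pos h12]
      rw [PySem.List.pyRange_one_append 0 y1 (height - 1) (by omega) (by omega),
          PySem.List.pyRange_one_append y1 (y1 + 1) (height - 1) (by omega) (by omega),
          PySem.List.pyRange_one_append (y1 + 1) y2 (height - 1) (by omega) (by omega),
          PySem.List.pyRange_one_append y2 (y2 + 1) (height - 1) (by omega) (by omega),
          PySem.List.pyRange_one_singleton y1, PySem.List.pyRange_one_singleton y2]
      simp only [List.map_append, List.map_cons, List.map_nil]
      rw [if_neg (show ¬ (y2 = y1) from by omega)]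
      simp only [if_true]
      rw [map_blank 0 y1 _ (f e) (fun y h1 h2 => by rw [if_neg (by omega), if_neg (by omega)]),
          map_blank (y1 + 1) y2 _ (f e) (fun y h1 h2 => by rw [if_neg (by omega), if_neg (by omega)]),
          map_blank (y2 + 1) (height - 1) _ (f e) (fun y h1 h2 => by rw [if_neg (by omega), if_neg (by omega)])]
      rw [show (y2 - (y1 + 1)).toNat = (y2 - y1 - 1).toNat from by omega,
          show (height - 1 - (y2 + 1)).toNat = (height - 1 - 1 - y2).toNat from by omega]
      simp [List.append_assoc]
    · rw [if_neg h12]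
      have he : y1 = y2 := by omega
      rw [PySem.List.pyRange_one_append 0 y1 (height - 1) (by omega) (by omega),
          PySem.List.pyRange_one_append y1 (y1 + 1) (height - 1) (by omega) (by omega),
          PySem.List.pyRange_one_singleton y1]
      simp only [List.map_append, List.map_cons, List.map_nil, if_true]
      rw [map_blank 0 y1 _ (f e) (fun y h1 h2 => by rw [if_neg (by omega), if_neg (by omega)]),
          map_blank (y1 + 1) (height - 1) _ (f e) (fun y h1 h2 => by rw [if_neg (by omega), if_neg (by omega)])]
      rw [show (height - 1 - (y1 + 1)).toNat = (height - 1 - 1 - y2).toNat from by omega]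
      simp [List.append_assoc]
  · rw [if_neg hn, PySem.List.pyRange_one_eq_nil (by omega)]
    simp

-- ===== VERDICT =====
theorem get_white_piano_spec : Claim_equal_get_white_piano := by
  intro notes keys w h _
  unfold Spec_get_white_piano get_white_piano get_white_piano_alt
  dsimp only
  rw [show (fun y => get_piano_line
        (if y = max (h - 5) 0 then notes else if y = max (h - 3) 0 then keys
         else List.replicate notes.length "") w ' ' '┃' '┃' '┃')
      = (fun y => row_alt
        (if y = max (h - 5) 0 then notes else if y = max (h - 3) 0 then keys
         else List.replicate notes.length "") w ' ' '┃' '┃' '┃') from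
    funext (fun y => line_eq _ w ' ' '┃' '┃' '┃')]
  rw [rows_eq notes keys (List.replicate notes.length "") h
        (fun labels => row_alt labels w ' ' '┃' '┃' '┃')]
  rw [line_eq]
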